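-- pv_equiv track=rewrite | github.com/dgavieira/Automacao-INDT | questao_5_turning_number.py | turning_number
-- ===== SOURCE A (Python) =====
-- def turning_number(lista, tamanho):
--     #cria uma contagem incremental
--     cresce = 1
--     #cria uma contagem decremental
--     decresce = 1
--
--     #loop para varrer o vetor
--     for i in range(1,tamanho):
--         #verifica se o número é menor que o anterior
--         if(lista[i] < lista[i - 1]):
--             #verifica se o vetor está no estágio crescente
--             if cresce == 1:
--                 #diminui a contagem decremental
--                 decresce = decresce + 1
--             else:
--                 #se houve um número maior que o outro, o vetor não está na parte decrescente
--                 return [-1,0];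
--             #verifica se o número é maior que o anterior
--         elif(lista[i] > lista[i - 1]):
--             #se o valor é 1, o vetor está no estágio crescente
--             if cresce == 1:
--                 #passa o ponto de mínimo do vetor
--                 minimo_global = lista[i-1]
--                 #passa o index do vetor
--                 index = i-1
--             if decresce >= 2:
--                 cresce = cresce + 1
--             else:
--                 return [-1, 0];
--         elif(lista[i] == lista[i - 1]):
--             return [-1, 0];
--     if (cresce >= 2 and decresce >= 2):
--         return [minimo_global,index];
--     else:
--         return [-1, 0];
-- ===== SOURCE B (Python) =====
-- def turning_number(lista, tamanho):
--     # Two explicit phase loops: walk down the strict descent, then up the strict ascent.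
--     i = 1
--     while i < tamanho and lista[i] < lista[i - 1]:
--         i += 1
--     bottom = i - 1
--     if bottom == 0 or i == tamanho:
--         return [-1, 0]
--     while i < tamanho and lista[i] > lista[i - 1]:
--         i += 1
--     if i == tamanho:
--         return [lista[bottom], bottom]
--     return [-1, 0]
-- ===== Notes on version B (the rewrite author's own statement) =====
-- stated objective: simpler
-- what changed: Replaced A's cresce/decresce counter state machine with nested branch logic by two explicit phase loops: walk down the strict descent, then up the strict ascent, and decide from where the loops stop.
import Mathlib
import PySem

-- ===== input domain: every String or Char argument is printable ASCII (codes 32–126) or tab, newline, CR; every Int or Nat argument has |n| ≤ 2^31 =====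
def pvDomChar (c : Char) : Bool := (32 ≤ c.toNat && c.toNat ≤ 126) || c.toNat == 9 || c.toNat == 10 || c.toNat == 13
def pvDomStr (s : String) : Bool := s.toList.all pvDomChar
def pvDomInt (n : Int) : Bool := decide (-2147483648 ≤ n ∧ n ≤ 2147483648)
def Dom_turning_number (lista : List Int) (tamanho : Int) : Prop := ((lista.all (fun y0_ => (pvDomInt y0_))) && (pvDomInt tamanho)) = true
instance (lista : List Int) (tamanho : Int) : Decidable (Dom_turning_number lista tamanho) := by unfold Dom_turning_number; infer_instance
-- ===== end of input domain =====

-- B replaces A's flag/counter state machine by two explicit phase loops (descent, then ascent); objective: simpler.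

-- ===== PORT A =====
-- one step of A's for-loop body; state: Sum.inl = early return, Sum.inr (cresce, decresce, minimo_global, index)
def tnStepA (lista : List Int) (st : Sum (List Int) (Int × Int × Int × Int)) (i : Int) :
    Sum (List Int) (Int × Int × Int × Int) :=
  match st with
  | Sum.inl out => Sum.inl out
  | Sum.inr (cresce, decresce, minimo, index) =>
    match PySem.List.pyGet? lista i, PySem.List.pyGet? lista (i - 1) with
    | some cur, some prev =>
      if cur < prev then
        if cresce = 1 then Sum.inr (cresce, decresce + 1, minimo, index)
        else Sum.inl [-1, 0]
      else if cur > prev then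
        let minimo := if cresce = 1 then prev else minimo
        let index := if cresce = 1 then i - 1 else index
        if 2 ≤ decresce then Sum.inr (cresce + 1, decresce, minimo, index)
        else Sum.inl [-1, 0]
      else Sum.inl [-1, 0]
    | _, _ => Sum.inl []   -- IndexError (outside Pre_)

def turning_number (lista : List Int) (tamanho : Int) : List Int :=
  -- minimo_global/index start as 0 placeholders: Python reads them only after assignment (cresce ≥ 2)
  match (PySem.List.pyRange 1 tamanho 1).foldl (tnStepA lista) (Sum.inr (1, 1, 0, 0)) with
  | Sum.inl out => out
  | Sum.inr (cresce, decresce, minimo, index) =>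
    if 2 ≤ cresce ∧ 2 ≤ decresce then [minimo, index] else [-1, 0]

-- ===== PORT B =====
-- first while loop: while i < tamanho and lista[i] < lista[i-1]: i += 1
-- (fuel = (tamanho - i).toNat counts the remaining iterations; none = IndexError)
def tnDescend (lista : List Int) (tamanho : Int) : Nat → Int → Option Int
  | 0, i => some i
  | fuel + 1, i =>
    if i < tamanho then
      match PySem.List.pyGet? lista i, PySem.List.pyGet? lista (i - 1) with
      | some cur, some prev =>
        if cur < prev then tnDescend lista tamanho fuel (i + 1) else some i
      | _, _ => none
    else some i

-- second while loop: while i < tamanho and lista[i] > lista[i-1]: i += 1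
def tnAscend (lista : List Int) (tamanho : Int) : Nat → Int → Option Int
  | 0, i => some i
  | fuel + 1, i =>
    if i < tamanho then
      match PySem.List.pyGet? lista i, PySem.List.pyGet? lista (i - 1) with
      | some cur, some prev =>
        if cur > prev then tnAscend lista tamanho fuel (i + 1) else some i
      | _, _ => none
    else some i

-- the tail of B after the first loop has stopped at index i
def tnFinish (lista : List Int) (tamanho : Int) (i : Int) : List Int :=
  let bottom := i - 1
  if bottom = 0 ∨ i = tamanho then [-1, 0]
  else
    match tnAscend lista tamanho (tamanho - i).toNat i with
    | none => []
    | some j =>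
      if j = tamanho then
        match PySem.List.pyGet? lista bottom with
        | some v => [v, bottom]
        | none => []   -- unreachable: lista[bottom] was read by the first loop
      else [-1, 0]

def turning_number_alt (lista : List Int) (tamanho : Int) : List Int :=
  match tnDescend lista tamanho (tamanho - 1).toNat 1 with
  | none => []
  | some i => tnFinish lista tamanho i

-- ===== PRECONDITION & SPEC =====
-- Pre_ excludes exactly the inputs where A raises IndexError: tamanho exceeds the length, the loop
-- actually runs (tamanho ≥ 2), and the whole list is scanned without an early return — i.e. the list
-- is too short (≤ 1) or is strictly-descending-then-strictly-ascending throughout.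
def Pre_turning_number (lista : List Int) (tamanho : Int) : Prop :=
  tamanho ≤ lista.length ∨ tamanho ≤ 1 ∨
    ¬ (lista.length ≤ 1 ∨ ∃ k : Fin lista.length, 0 < (k : ℕ) ∧
        List.Pairwise (· > ·) (lista.take ((k : ℕ) + 1)) ∧ List.Pairwise (· < ·) (lista.drop (k : ℕ)))
instance (lista : List Int) (tamanho : Int) : Decidable (Pre_turning_number lista tamanho) := by
  unfold Pre_turning_number; infer_instance

def pvWitness_turning_number : List Int × Int := ([3, 1, 2], 3)

def Spec_turning_number (lista : List Int) (tamanho : Int) (out : List Int) : Prop := out = turning_number_alt lista tamanho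
instance (lista : List Int) (tamanho : Int) (out : List Int) : Decidable (Spec_turning_number lista tamanho out) := by unfold Spec_turning_number; infer_instance

-- ===== CLAIM (what is proved, stated in full; the proofs are below) =====
def Claim_equal_turning_number : Prop := ∀ (lista : List Int) (tamanho : Int), Dom_turning_number lista tamanho → Pre_turning_number lista tamanho → Spec_turning_number lista tamanho (turning_number lista tamanho)

-- ===== LEMMAS AND PROOFS =====

-- an early return is final
lemma foldl_tnStepA_inl (lista : List Int) (out : List Int) (l : List Int) :
    l.foldl (tnStepA lista) (Sum.inl out) = Sum.inl out := by
  induction l with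
  | nil => rfl
  | cons x xs ih => simpa [List.foldl, tnStepA] using ih

def tnFinishA (st : Sum (List Int) (Int × Int × Int × Int)) : List Int :=
  match st with
  | Sum.inl out => out
  | Sum.inr (cresce, decresce, minimo, index) =>
    if 2 ≤ cresce ∧ 2 ≤ decresce then [minimo, index] else [-1, 0]

-- phase 2: once cresce ≥ 2 and decresce ≥ 2, A's remaining loop is B's second while loop
lemma phase2 (lista : List Int) (tamanho : Int) :
    ∀ (fuel : Nat) (i c d m x : Int), fuel = (tamanho - i).toNat → 2 ≤ c → 2 ≤ d → i ≤ tamanho →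
    tnFinishA ((PySem.List.pyRange i tamanho 1).foldl (tnStepA lista) (Sum.inr (c, d, m, x)))
      = (match tnAscend lista tamanho fuel i with
         | none => []
         | some j => if j = tamanho then [m, x] else [-1, 0]) := by
  intro fuel
  induction fuel generalizing tamanho with
  | zero =>
    intro i c d m x hf hc hd hle
    have hit : i = tamanho := by omega
    rw [PySem.List.pyRange_one_eq_nil (by omega)]
    simp [tnAscend, tnFinishA, hit, hc, hd]
  | succ n ihf =>
    intro i c d m x hf hc hd hle
    have h : i < tamanho := by omega
    rw [PySem.List.pyRange_one_cons h]
    rw [tnAscend]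
    simp only [h, if_true, if_pos]
    cases hcur : PySem.List.pyGet? lista i with
    | none =>
      simp [List.foldl, tnStepA, hcur, foldl_tnStepA_inl, tnFinishA]
    | some cur =>
      cases hprev : PySem.List.pyGet? lista (i - 1) with
      | none => simp [List.foldl, tnStepA, hcur, hprev, foldl_tnStepA_inl, tnFinishA]
      | some prev =>
        by_cases hlt : cur < prev
        · have hngt : ¬ cur > prev := by omega
          have hc1 : ¬ c = 1 := by omega
          simp [List.foldl, tnStepA, hcur, hprev, hlt, hngt, hc1, foldl_tnStepA_inl, tnFinishA]
          omega
        · by_cases hgt : cur > prev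
          · have ih := ihf tamanho (i + 1) (c + 1) d m x (by omega) (by omega) hd (by omega)
            have hc1 : ¬ c = 1 := by omega
            simp only [List.foldl, tnStepA, hcur, hprev, hlt, hgt, hc1, if_false, hd]
            simpa [hd, hgt, hlt, hc1] using ih
          · have heq : cur = prev := by omega
            simp [List.foldl, tnStepA, hcur, hprev, hlt, hgt, foldl_tnStepA_inl, tnFinishA]
            omega

-- phase 1: while cresce = 1 with decresce = i, A's loop is B's first while loop followed by tnFinish
lemma phase1 (lista : List Int) (tamanho : Int) :
    ∀ (fuel : Nat) (i m x : Int), fuel = (tamanho - i).toNat → 1 ≤ i → i ≤ tamanho →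
    tnFinishA ((PySem.List.pyRange i tamanho 1).foldl (tnStepA lista) (Sum.inr (1, i, m, x)))
      = (match tnDescend lista tamanho fuel i with
         | none => []
         | some j => tnFinish lista tamanho j) := by
  intro fuel
  induction fuel generalizing tamanho with
  | zero =>
    intro i m x hf h1 hle
    have hit : i = tamanho := by omega
    rw [PySem.List.pyRange_one_eq_nil (by omega)]
    simp [tnDescend, tnFinishA, tnFinish, hit, (by omega : ¬ (2 : Int) ≤ 1)]
  | succ n ihf =>
    intro i m x hf h1 hle
    have h : i < tamanho := by omega
    rw [PySem.List.pyRange_one_cons h]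
    rw [tnDescend]
    simp only [h, if_true, if_pos]
    cases hcur : PySem.List.pyGet? lista i with
    | none => simp [List.foldl, tnStepA, hcur, foldl_tnStepA_inl, tnFinishA]
    | some cur =>
      cases hprev : PySem.List.pyGet? lista (i - 1) with
      | none => simp [List.foldl, tnStepA, hcur, hprev, foldl_tnStepA_inl, tnFinishA]
      | some prev =>
        by_cases hlt : cur < prev
        · have ih := ihf tamanho (i + 1) m x (by omega) (by omega) (by omega)
          simp only [List.foldl, tnStepA, hcur, hprev, hlt, if_pos]
          simpa using ih
        · by_cases hgt : cur > prev
          · -- first ascent: A records (prev, i-1); B stops the first loop at i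
            simp only [List.foldl, tnStepA, hcur, hprev, hlt, hgt, if_neg, if_pos,
              not_false_iff]
            by_cases hd : 2 ≤ i
            · -- decresce = i ≥ 2: enter phase 2
              have h2 := phase2 lista tamanho ((tamanho - (i + 1)).toNat) (i + 1) (1 + 1) i
                prev (i - 1) rfl (by omega) hd (by omega)
              have hb0 : ¬ (i - 1 = 0 ∨ i = tamanho) := by omega
              have hfu : (tamanho - i).toNat = (tamanho - (i + 1)).toNat + 1 := by omega
              have hstep : tnAscend lista tamanho ((tamanho - i).toNat) i
                  = tnAscend lista tamanho ((tamanho - (i + 1)).toNat) (i + 1) := by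
                rw [hfu, tnAscend]; simp [h, hcur, hprev, hgt]
              simp only [if_pos hd]
              rw [h2]
              cases htn : tnAscend lista tamanho ((tamanho - (i + 1)).toNat) (i + 1) <;>
                simp [tnFinish, hb0, hstep, hprev, htn]
            · -- i = 1: Python returns [-1,0]; B: bottom = 0
              have hi1 : i = 1 := by omega
              simp [if_neg hd, foldl_tnStepA_inl, tnFinishA, tnFinish, hi1]
          · -- equal pair: A returns [-1,0]; B stops both loops
            have heq : cur = prev := by omega
            simp only [List.foldl, tnStepA, hcur, hprev, hlt, hgt, if_neg, not_false_iff]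
            simp only [foldl_tnStepA_inl, tnFinishA, tnFinish]
            by_cases hb : i - 1 = 0 ∨ i = tamanho
            · simp [hb]
            · have hfu : (tamanho - i).toNat = (tamanho - (i + 1)).toNat + 1 := by omega
              rw [hfu, tnAscend]
              simp [h, hcur, hprev, hgt, hb]
              omega

-- the ports agree on every input (Pre_ is needed only for faithfulness to Python, where A raises)
lemma ports_eq (lista : List Int) (tamanho : Int) :
    turning_number lista tamanho = turning_number_alt lista tamanho := by
  unfold turning_number turning_number_alt
  by_cases h : 1 ≤ tamanho
  · have := phase1 lista tamanho ((tamanho - 1).toNat) 1 0 0 rfl (by omega) h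
    simpa [tnFinishA] using this
  · rw [PySem.List.pyRange_one_eq_nil (by omega)]
    rw [(by omega : (tamanho - 1).toNat = 0)]
    norm_num [tnDescend, tnFinish]

-- ===== VERDICT (by name: the statement is the Claim_ definition above) =====
theorem turning_number_spec : Claim_equal_turning_number := by
  intro lista tamanho _ _
  unfold Spec_turning_number
  exact ports_eq lista tamanho
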